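-- pv_equiv track=rewrite | github.com/VakhromeevaKate/yandex-algorythms-6-0 | day2/H.py | count_min_moves
-- ===== SOURCE A (Python) =====
-- import math
-- import math
--
-- def count_min_moves(arr):
--     mincount = math.inf
--     for i in range(len(arr)):
--         count = 0
--         for p in range(len(arr)):
--             if p != i:
--                 count += arr[p] * abs(p - i)
--         if mincount > count:
--             mincount = count
--     return mincount
-- ===== SOURCE B (Python) =====
-- def count_min_moves(arr):
--     # O(n): cost(0) = sum(p*arr[p]); cost(i+1) = cost(i) + pfx - (total - pfx)
--     total = sum(arr)
--     cost = sum(p * v for p, v in enumerate(arr))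
--     best = cost
--     pfx = 0
--     for i in range(len(arr) - 1):
--         pfx += arr[i]
--         cost += pfx - (total - pfx)
--         if cost < best:
--             best = cost
--     return best
-- ===== Notes on version B (the rewrite author's own statement) =====
-- stated objective: faster
-- what changed: replaced the O(n^2) double loop by a single O(n) sweep that updates each pivot's cost from the previous one via a running prefix sum (cost(i+1) = cost(i) + 2*prefix - total)
-- outside the precondition, e.g. on count_min_moves([]): A returns inf, B returns 0
import Mathlib
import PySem

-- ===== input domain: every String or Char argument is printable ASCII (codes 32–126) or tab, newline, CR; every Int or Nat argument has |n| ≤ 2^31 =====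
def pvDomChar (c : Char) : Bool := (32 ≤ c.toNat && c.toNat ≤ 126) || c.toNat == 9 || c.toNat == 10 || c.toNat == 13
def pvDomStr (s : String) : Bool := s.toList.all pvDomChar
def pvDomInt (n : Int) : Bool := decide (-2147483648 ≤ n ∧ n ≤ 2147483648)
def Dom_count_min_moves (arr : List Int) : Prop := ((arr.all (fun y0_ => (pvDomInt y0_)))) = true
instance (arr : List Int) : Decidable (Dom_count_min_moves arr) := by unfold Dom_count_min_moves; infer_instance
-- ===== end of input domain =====

-- B replaces A's O(n^2) double loop by a single O(n) sweep that updates each pivot's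
-- cost from the previous one via a running pfx sum.

-- ===== PORT A =====
-- outer loop state is Python's mincount: none plays math.inf (no candidate accepted yet)
def count_min_moves (arr : List Int) : Int :=
  ((PySem.List.pyRange 0 (arr.length : Int) 1).foldl
    (fun (mincount : Option Int) i =>
      let count := (PySem.List.pyRange 0 (arr.length : Int) 1).foldl
        (fun c p => if p ≠ i then c + PySem.List.pyGetD arr p 0 * |p - i| else c) 0
      match mincount with
      | none => some count
      | some m => if m > count then some count else some m)
    none).getD 0

-- ===== PORT B =====
def count_min_moves_alt (arr : List Int) : Int :=
  let total := arr.sum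
  let cost0 := (PySem.List.enumerate arr).foldl (fun s pv => s + pv.1 * pv.2) 0
  (((PySem.List.pyRange 0 ((arr.length : Int) - 1) 1).foldl
    (fun (st : Int × Int × Int) i =>
      let pfx := st.2.2 + PySem.List.pyGetD arr i 0
      let cost := st.2.1 + (pfx - (total - pfx))
      ((if cost < st.1 then cost else st.1), cost, pfx))
    (cost0, cost0, 0)) : Int × Int × Int).1

-- ===== PRECONDITION & SPEC =====
-- Pre_ excludes only the empty list, on which A returns math.inf — a float, not an int.
def Pre_count_min_moves (arr : List Int) : Prop := arr ≠ []
instance (arr : List Int) : Decidable (Pre_count_min_moves arr) := by unfold Pre_count_min_moves; infer_instance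
def pvWitness_count_min_moves : List Int := [3, -1, 4]

def Spec_count_min_moves (arr : List Int) (out : Int) : Prop := out = count_min_moves_alt arr
instance (arr : List Int) (out : Int) : Decidable (Spec_count_min_moves arr out) := by unfold Spec_count_min_moves; infer_instance

-- ===== CLAIM (what is proved, stated in full; the proofs are below) =====
def Claim_equal_count_min_moves : Prop := ∀ (arr : List Int), Dom_count_min_moves arr → Pre_count_min_moves arr → Spec_count_min_moves arr (count_min_moves arr)

-- ===== LEMMAS AND PROOFS =====

-- reference cost of pivot i : Σ_k arr[k] * |k - i|
def pvCost : List Int → Int → Int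
  | [], _ => 0
  | x :: xs, i => x * |(0 : Int) - i| + pvCost xs (i - 1)

-- pfx sum Σ_{k < j} arr[k] (0 for j ≤ 0)
def pvPre : List Int → Int → Int
  | [], _ => 0
  | x :: xs, j => if 0 < j then x + pvPre xs (j - 1) else 0

-- running minimum of pvCost over pivots 0..m
def pvBest (arr : List Int) : Nat → Int
  | 0 => pvCost arr 0
  | m + 1 => if pvCost arr ((m : Int) + 1) < pvBest arr m then pvCost arr ((m : Int) + 1)
             else pvBest arr m

theorem pvPre_nonpos (xs : List Int) (j : Int) (h : j ≤ 0) : pvPre xs j = 0 := by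
  cases xs with
  | nil => rfl
  | cons x xs => simp only [pvPre, if_neg (by omega : ¬ (0 < j))]

theorem pvCost_delta (xs : List Int) (i : Int) :
    pvCost xs (i + 1) = pvCost xs i + 2 * pvPre xs (i + 1) - xs.sum := by
  induction xs generalizing i with
  | nil => simp [pvCost, pvPre]
  | cons x xs ih =>
    have hih := ih (i - 1)
    rw [show i - 1 + 1 = i from by ring] at hih
    simp only [pvCost, pvPre, List.sum_cons]
    rw [show i + 1 - 1 = i from by ring]
    by_cases h : 0 < i + 1
    · rw [if_pos h, abs_of_nonpos (by omega : (0:Int) - (i+1) ≤ 0),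
        abs_of_nonpos (by omega : (0:Int) - i ≤ 0), hih]
      ring
    · rw [pvPre_nonpos xs i (by omega)] at hih
      rw [if_neg h, abs_of_nonneg (by omega : (0:Int) ≤ 0 - (i+1)),
        abs_of_nonneg (by omega : (0:Int) ≤ 0 - i), hih]
      ring

theorem pvPre_succ (xs : List Int) (m : Nat) :
    pvPre xs ((m : Int) + 1) = pvPre xs (m : Int) + xs.getD m 0 := by
  induction xs generalizing m with
  | nil => simp [pvPre]
  | cons x xs ih =>
    cases m with
    | zero => simp [pvPre, pvPre_nonpos xs 0 le_rfl]
    | succ m =>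
      have h1 : ((m + 1 : Nat) : Int) + 1 - 1 = (m : Int) + 1 := by push_cast; ring
      have h2 : ((m + 1 : Nat) : Int) - 1 = (m : Int) := by push_cast; ring
      simp only [pvPre, if_pos (by push_cast; omega : (0:Int) < ((m+1:Nat):Int) + 1),
        if_pos (by push_cast; omega : (0:Int) < ((m+1:Nat):Int)), h1, h2,
        List.getD_cons_succ, ih m]
      ring

theorem pvCost0 (xs : List Int) (s c : Int) (hs : 0 ≤ s) :
    (PySem.List.enumerate xs s).foldl (fun a pv => a + pv.1 * pv.2) c = c + pvCost xs (-s) := by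
  induction xs generalizing s c with
  | nil => simp [PySem.List.enumerate_nil, pvCost]
  | cons x xs ih =>
    simp only [PySem.List.enumerate_cons, List.foldl_cons, pvCost]
    rw [ih (s + 1) (c + s * x) (by omega),
      show -s - 1 = -(s + 1) from by ring,
      abs_of_nonneg (by omega : (0:Int) ≤ 0 - -s)]
    ring

theorem pvInnerSum (xs : List Int) (i : Int) :
    ((List.range xs.length).map (fun k => xs.getD k 0 * |(k : Int) - i|)).sum = pvCost xs i := by
  induction xs generalizing i with
  | nil => simp [pvCost]
  | cons x xs ih =>
    rw [List.length_cons, List.range_succ_eq_map]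
    simp only [List.map_cons, List.map_map, List.sum_cons, Function.comp_def,
      Nat.succ_eq_add_one, List.getD_cons_zero, List.getD_cons_succ, pvCost]
    have hf : (fun k : Nat => xs.getD k 0 * |((k + 1 : Nat) : Int) - i|)
        = fun k : Nat => xs.getD k 0 * |(k : Int) - (i - 1)| := by
      funext k
      congr 1
      congr 1
      push_cast
      ring
    rw [hf, ih (i - 1)]
    simp

theorem inner_eq (arr : List Int) (i : Int) :
    (PySem.List.pyRange 0 (arr.length : Int) 1).foldl
      (fun c p => if p ≠ i then c + PySem.List.pyGetD arr p 0 * |p - i| else c) 0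
      = pvCost arr i := by
  have hfun : (fun (c p : Int) => if p ≠ i then c + PySem.List.pyGetD arr p 0 * |p - i| else c)
      = fun c p => c + PySem.List.pyGetD arr p 0 * |p - i| := by
    funext c p
    by_cases h : p = i
    · subst h; simp
    · rw [if_pos h]
  rw [hfun, PySem.List.foldl_add, PySem.List.pyRange_one]
  simp only [List.map_map, Function.comp_def, zero_add, Int.sub_zero, Int.toNat_natCast,
    PySem.List.pyGetD_natCast]
  rw [pvInnerSum]

theorem outer_eq (arr : List Int) (m : Nat) :
    (PySem.List.pyRange 0 ((m + 1 : Nat) : Int) 1).foldl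
      (fun (mincount : Option Int) i =>
        let count := (PySem.List.pyRange 0 (arr.length : Int) 1).foldl
          (fun c p => if p ≠ i then c + PySem.List.pyGetD arr p 0 * |p - i| else c) 0
        match mincount with
        | none => some count
        | some mc => if mc > count then some count else some mc)
      none = some (pvBest arr m) := by
  induction m with
  | zero =>
    rw [show ((0 + 1 : Nat) : Int) = 0 + 1 from by norm_num,
      PySem.List.pyRange_one_singleton]
    simp only [List.foldl_cons, List.foldl_nil, inner_eq, pvBest]
  | succ m ih =>
    rw [show ((m + 1 + 1 : Nat) : Int) = ((m + 1 : Nat) : Int) + 1 from by push_cast; ring,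
      PySem.List.pyRange_one_succ_right (by positivity), List.foldl_append, ih]
    simp only [List.foldl_cons, List.foldl_nil, inner_eq, pvBest]
    rw [show ((m + 1 : Nat) : Int) = (m : Int) + 1 from by push_cast; ring]
    by_cases h : pvCost arr ((m : Int) + 1) < pvBest arr m
    · rw [if_pos h, if_pos h]
    · rw [if_neg h, if_neg h]

theorem b_loop (arr : List Int) (m : Nat) :
    (PySem.List.pyRange 0 ((m : Nat) : Int) 1).foldl
      (fun (st : Int × Int × Int) i =>
        let pfx := st.2.2 + PySem.List.pyGetD arr i 0
        let cost := st.2.1 + (pfx - (arr.sum - pfx))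
        ((if cost < st.1 then cost else st.1), cost, pfx))
      (pvCost arr 0, pvCost arr 0, 0)
      = (pvBest arr m, pvCost arr (m : Int), pvPre arr (m : Int)) := by
  induction m with
  | zero =>
    simp [pvBest, pvPre_nonpos arr 0 le_rfl]
  | succ m ih =>
    rw [show ((m + 1 : Nat) : Int) = ((m : Nat) : Int) + 1 from by push_cast; ring,
      PySem.List.pyRange_one_succ_right (by positivity), List.foldl_append, ih]
    simp only [List.foldl_cons, List.foldl_nil, PySem.List.pyGetD_natCast]
    rw [← pvPre_succ arr m]
    have hc : pvCost arr (m : Int) + (pvPre arr ((m : Int) + 1) - (arr.sum - pvPre arr ((m : Int) + 1)))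
        = pvCost arr ((m : Int) + 1) := by
      rw [pvCost_delta arr (m : Int)]; ring
    rw [hc]
    simp only [pvBest]

-- ===== VERDICT (by name: the statement is the Claim_ definition above) =====
theorem count_min_moves_spec : Claim_equal_count_min_moves := by
  intro arr _hdom hpre
  unfold Spec_count_min_moves count_min_moves count_min_moves_alt
  obtain ⟨m, hm⟩ : ∃ m, arr.length = m + 1 := by
    cases harr : arr with
    | nil => exact absurd harr hpre
    | cons x xs => exact ⟨xs.length, by simp⟩
  have hc0 : (PySem.List.enumerate arr).foldl (fun s pv => s + pv.1 * pv.2) 0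
      = pvCost arr 0 := by
    have := pvCost0 arr 0 0 le_rfl
    simpa using this
  rw [hm, hc0]
  rw [show ((m + 1 : Nat) : Int) - 1 = ((m : Nat) : Int) from by push_cast; ring]
  have hb := b_loop arr m
  have ha := outer_eq arr m
  rw [hm] at ha
  simp only [ha, hb, Option.getD_some]
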